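-- pv_equiv track=rewrite | github.com/daviddoret/punctilious | sandbox/test3.py | _find_length_and_sum
-- ===== SOURCE A (Python) =====
-- from typing import List, Tuple
-- import math
--
-- def _count_sequences_with_exact_length_and_sum(length: int, target_sum: int = None) -> int:
--     """
--     Counts sequences with exact length and optionally exact sum.
--     If target_sum is None, counts all sequences of the given length.
--
--     This uses the stars and bars combinatorial method:
--     Number of ways to distribute n identical items into k distinct bins
--     is C(n + k - 1, k - 1).
--     """
--     if length == 0:
--         return 1 if target_sum is None or target_sum == 0 else 0
--
--     if target_sum is None:
--         # Count all sequences of given length - this grows very quickly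
--         # We use a practical upper bound for computation
--         count = 0
--         max_reasonable_sum = 50  # Practical limit to prevent infinite computation
--         for s in range(max_reasonable_sum):
--             count += math.comb(s + length - 1, length - 1)
--         return count
--
--     if target_sum < 0:
--         return 0
--
--     return math.comb(target_sum + length - 1, length - 1)
--
-- def _find_length_and_sum(rank: int) -> Tuple[int, int, int]:
--     """
--     Finds the length and sum of the sequence at the given rank.
--     Returns (length, sum, remaining_rank_within_same_length_and_sum).
--     """
--     current_rank = 0
--
--     # Try different lengths starting from 1 (since rank 0 is empty sequence)
--     for length in range(1, 100):  # Practical upper bound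
--         # Try different sums for this length
--         for total_sum in range(100):  # Practical upper bound
--             count = _count_sequences_with_exact_length_and_sum(length, total_sum)
--
--             if current_rank + count > rank:
--                 return length, total_sum, rank - current_rank
--
--             current_rank += count
--
--     raise ValueError(f"Could not find sequence for rank {rank} within reasonable bounds")
-- ===== SOURCE B (Python) =====
-- import math
-- from typing import Tuple
--
-- def _find_length_and_sum(rank: int) -> Tuple[int, int, int]:
--     """Two-phase search: skip whole length-blocks using the hockey-stick
--     closed form comb(length+99, length), then scan sums within the block."""
--     current_rank = 0
--     for length in range(1, 100):
--         block_total = math.comb(length + 99, length)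
--         if current_rank + block_total > rank:
--             for total_sum in range(100):
--                 count = math.comb(total_sum + length - 1, length - 1)
--                 if current_rank + count > rank:
--                     return length, total_sum, rank - current_rank
--                 current_rank += count
--         else:
--             current_rank += block_total
--     raise ValueError(f"Could not find sequence for rank {rank} within reasonable bounds")
-- ===== Notes on version B (the rewrite author's own statement) =====
-- stated objective: alternative
-- what changed: B replaces A's flat scan over every (length, total_sum) cell (a hundred binomials per length) by a two-phase search: it first locates the target length by skipping whole length blocks using the hockey-stick closed form for the block total, and only then scans the sums inside that one block.
import Mathlib
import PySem

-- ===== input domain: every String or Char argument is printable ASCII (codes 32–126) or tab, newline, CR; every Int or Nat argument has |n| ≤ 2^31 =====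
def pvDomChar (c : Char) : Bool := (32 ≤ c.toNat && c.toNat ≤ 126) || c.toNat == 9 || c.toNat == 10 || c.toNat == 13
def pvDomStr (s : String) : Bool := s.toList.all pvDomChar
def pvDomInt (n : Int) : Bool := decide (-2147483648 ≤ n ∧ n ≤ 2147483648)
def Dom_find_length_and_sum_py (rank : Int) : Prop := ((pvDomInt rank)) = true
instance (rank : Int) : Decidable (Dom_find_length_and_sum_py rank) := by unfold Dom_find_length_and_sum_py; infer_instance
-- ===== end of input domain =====

-- B replaces A's flat 9900-step (length,sum) scan by a two-phase search that skips whole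
-- length blocks via the hockey-stick closed form comb(length+99, length) (objective: alternative).
-- Within the stated domain neither program raises; on the astronomically large ranks where A
-- raises ValueError, B raises the same ValueError (the ports both return (0,0,0) there).

-- math.comb(n, k) for the nonnegative arguments both programs use (exact there)
def pyComb (n k : Int) : Int := (Nat.choose n.toNat k.toNat : Int)

-- ===== PORT A =====
def count_sequences_with_exact_length_and_sum (length : Int) (target_sum : Option Int) : Int :=
  if length = 0 then (if target_sum = none ∨ target_sum = some 0 then 1 else 0)
  else
    match target_sum with
    | none =>
        (PySem.List.pyRange 0 50 1).foldl
          (fun count s => count + pyComb (s + length - 1) (length - 1)) 0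
    | some t => if t < 0 then 0 else pyComb (t + length - 1) (length - 1)

-- inner 'for total_sum in range(100)' loop: Sum.inl = early return, Sum.inr = fall through
def loopSumsA (rank length : Int) (sums : List Int) (cur : Int) : (Int × Int × Int) ⊕ Int :=
  match sums with
  | [] => Sum.inr cur
  | s :: rest =>
      let count := count_sequences_with_exact_length_and_sum length (some s)
      if cur + count > rank then Sum.inl (length, s, rank - cur)
      else loopSumsA rank length rest (cur + count)

-- outer 'for length in range(1, 100)' loop; [] = ValueError (unreachable on Dom), ported as (0,0,0)
def loopLensA (rank : Int) (lens : List Int) (cur : Int) : Int × Int × Int :=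
  match lens with
  | [] => (0, 0, 0)
  | L :: rest =>
      match loopSumsA rank L (PySem.List.pyRange 0 100 1) cur with
      | Sum.inl r => r
      | Sum.inr cur' => loopLensA rank rest cur'

def find_length_and_sum_py (rank : Int) : Int × Int × Int :=
  loopLensA rank (PySem.List.pyRange 1 100 1) 0

-- ===== PORT B =====
-- inner scan of B: only entered when the block is known to contain rank
def loopSumsB (rank length : Int) (sums : List Int) (cur : Int) : Int × Int × Int :=
  match sums with
  | [] => (0, 0, 0)
  | s :: rest =>
      if cur + pyComb (s + length - 1) (length - 1) > rank then (length, s, rank - cur)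
      else loopSumsB rank length rest (cur + pyComb (s + length - 1) (length - 1))

-- outer loop of B: skip a whole length block using the closed-form block total
def loopLensB (rank : Int) (lens : List Int) (cur : Int) : Int × Int × Int :=
  match lens with
  | [] => (0, 0, 0)
  | L :: rest =>
      if cur + pyComb (L + 99) L > rank then loopSumsB rank L (PySem.List.pyRange 0 100 1) cur
      else loopLensB rank rest (cur + pyComb (L + 99) L)

def find_length_and_sum_py_alt (rank : Int) : Int × Int × Int :=
  loopLensB rank (PySem.List.pyRange 1 100 1) 0

-- ===== PRECONDITION & SPEC =====
def Spec_find_length_and_sum_py (rank : Int) (out : Int × Int × Int) : Prop := out = find_length_and_sum_py_alt rank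
instance (rank : Int) (out : Int × Int × Int) : Decidable (Spec_find_length_and_sum_py rank out) := by unfold Spec_find_length_and_sum_py; infer_instance

-- ===== CLAIM (what is proved, stated in full; the proofs are below) =====
def Claim_equal_find_length_and_sum_py : Prop := ∀ (rank : Int), Dom_find_length_and_sum_py rank → Spec_find_length_and_sum_py rank (find_length_and_sum_py rank)

-- ===== LEMMAS AND PROOFS =====

-- sum of the per-sum counts over a list of sums
def SInt (L : Int) (sums : List Int) : Int :=
  (sums.map (fun s => pyComb (s + L - 1) (L - 1))).sum

theorem pyComb_nonneg (n k : Int) : 0 ≤ pyComb n k := Int.natCast_nonneg _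

theorem SInt_nonneg (L : Int) (sums : List Int) : 0 ≤ SInt L sums := by
  unfold SInt
  refine List.sum_nonneg ?_
  intro x hx
  obtain ⟨s, _, rfl⟩ := List.mem_map.mp hx
  exact pyComb_nonneg _ _

theorem count_eq (L s : Int) (hL : 1 ≤ L) (hs : 0 ≤ s) :
    count_sequences_with_exact_length_and_sum L (some s) = pyComb (s + L - 1) (L - 1) := by
  unfold count_sequences_with_exact_length_and_sum
  have h0 : ¬ L = 0 := by omega
  have h1 : ¬ s < 0 := by omega
  simp [h0, h1]

-- if the running total stays ≤ rank through the whole list, A's inner loop falls through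
theorem innerSkip (rank L : Int) (sums : List Int) :
    ∀ (cur : Int), 1 ≤ L → (∀ s ∈ sums, 0 ≤ s) → cur + SInt L sums ≤ rank →
    loopSumsA rank L sums cur = Sum.inr (cur + SInt L sums) := by
  induction sums with
  | nil => intro cur _ _ _; simp [loopSumsA, SInt]
  | cons s rest ih =>
      intro cur hL hmem hle
      have hs : 0 ≤ s := hmem s (by simp)
      have hS : SInt L (s :: rest) = pyComb (s + L - 1) (L - 1) + SInt L rest := by
        simp [SInt]
      have hrest : 0 ≤ SInt L rest := SInt_nonneg L rest
      have hng : ¬ (cur + count_sequences_with_exact_length_and_sum L (some s) > rank) := by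
        rw [count_eq L s hL hs]; omega
      rw [loopSumsA]
      simp only [hng, if_false]
      rw [count_eq L s hL hs]
      have := ih (cur + pyComb (s + L - 1) (L - 1)) hL
        (fun x hx => hmem x (by simp [hx])) (by omega)
      rw [this, hS]; ring_nf

-- if the block contains rank, A's inner loop returns early and B's inner loop returns the same value
theorem innerFound (rank L : Int) (sums : List Int) :
    ∀ (cur : Int), 1 ≤ L → (∀ s ∈ sums, 0 ≤ s) → rank < cur + SInt L sums → sums ≠ [] →
    ∃ r, loopSumsA rank L sums cur = Sum.inl r ∧ loopSumsB rank L sums cur = r := by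
  induction sums with
  | nil => intro cur _ _ _ hne; exact absurd rfl hne
  | cons s rest ih =>
      intro cur hL hmem hlt _
      have hs : 0 ≤ s := hmem s (by simp)
      have hS : SInt L (s :: rest) = pyComb (s + L - 1) (L - 1) + SInt L rest := by
        simp [SInt]
      by_cases hfound : cur + count_sequences_with_exact_length_and_sum L (some s) > rank
      · refine ⟨(L, s, rank - cur), ?_, ?_⟩
        · rw [loopSumsA]; simp only [hfound, if_true]
        · rw [loopSumsB]
          have : cur + pyComb (s + L - 1) (L - 1) > rank := by
            rw [count_eq L s hL hs] at hfound; exact hfound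
          simp only [this, if_true]
      · have hle : cur + pyComb (s + L - 1) (L - 1) ≤ rank := by
          rw [count_eq L s hL hs] at hfound; omega
        cases rest with
        | nil =>
            exfalso
            have : SInt L ([] : List Int) = 0 := by simp [SInt]
            rw [hS, this] at hlt; omega
        | cons s' rest' =>
            obtain ⟨r, hA, hB⟩ := ih (cur + pyComb (s + L - 1) (L - 1)) hL
              (fun x hx => hmem x (by simp [hx])) (by rw [hS] at hlt; omega) (by simp)
            refine ⟨r, ?_, ?_⟩
            · rw [loopSumsA]; simp only [hfound, if_false]
              rw [count_eq L s hL hs]; exact hA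
            · rw [loopSumsB]
              have hng : ¬ (cur + pyComb (s + L - 1) (L - 1) > rank) := by omega
              simp only [hng, if_false]; exact hB

-- hockey stick over ℕ, as a list sum of casts
theorem hsN (k : Nat) : ∀ (N : Nat),
    ((List.range N).map (fun s => ((Nat.choose (s + k) k : Nat) : Int))).sum
      = ((Nat.choose (N + k) (k + 1) : Nat) : Int) := by
  intro N
  induction N with
  | zero => simp
  | succ n ih =>
      rw [List.range_succ, List.map_append, List.sum_append, ih]
      simp only [List.map_cons, List.map_nil, List.sum_cons, List.sum_nil]
      rw [show n + 1 + k = n + k + 1 from by omega, Nat.choose_succ_succ]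
      push_cast; ring

-- the block total of B equals the sum of A's inner counts over range(100)
theorem bridge (L : Int) (hL : 1 ≤ L) :
    SInt L (PySem.List.pyRange 0 100 1) = pyComb (L + 99) L := by
  have hrange : PySem.List.pyRange 0 100 1 = (List.range 100).map (fun j : Nat => (j : Int)) := by
    simp [PySem.List.pyRange_one]
  unfold SInt
  rw [hrange, List.map_map]
  have hcomp : ((fun s => pyComb (s + L - 1) (L - 1)) ∘ (fun j : Nat => (j : Int)))
      = fun j : Nat => ((Nat.choose (j + (L - 1).toNat) ((L - 1).toNat) : Nat) : Int) := by
    funext j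
    simp only [Function.comp]
    unfold pyComb
    have h1 : ((j : Int) + L - 1).toNat = j + (L - 1).toNat := by omega
    rw [h1]
  rw [hcomp, hsN ((L - 1).toNat) 100]
  unfold pyComb
  have h3 : (L + 99).toNat = 100 + (L - 1).toNat := by omega
  have h4 : L.toNat = (L - 1).toNat + 1 := by omega
  rw [h3, h4]

theorem outer (rank : Int) (lens : List Int) :
    ∀ (cur : Int), (∀ L ∈ lens, 1 ≤ L) → loopLensA rank lens cur = loopLensB rank lens cur := by
  induction lens with
  | nil => intro cur _; simp [loopLensA, loopLensB]
  | cons L rest ih =>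
      intro cur hmem
      have hL : 1 ≤ L := hmem L (by simp)
      have hb : SInt L (PySem.List.pyRange 0 100 1) = pyComb (L + 99) L := bridge L hL
      have hnn : ∀ s ∈ PySem.List.pyRange 0 100 1, 0 ≤ s := by
        intro s hs
        exact ((PySem.List.mem_pyRange_one).mp hs).1
      have hne : PySem.List.pyRange 0 100 1 ≠ ([] : List Int) := by
        rw [PySem.List.pyRange_one_cons (by norm_num)]
        exact List.cons_ne_nil _ _
      rw [loopLensA, loopLensB]
      by_cases hcase : cur + pyComb (L + 99) L > rank
      · obtain ⟨r, hA, hB⟩ := innerFound rank L (PySem.List.pyRange 0 100 1) cur hL hnn (by omega) hne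
        rw [hA, if_pos hcase]
        exact hB.symm
      · have hskip := innerSkip rank L (PySem.List.pyRange 0 100 1) cur hL hnn (by omega)
        rw [hskip, if_neg hcase]
        have heq : cur + SInt L (PySem.List.pyRange 0 100 1) = cur + pyComb (L + 99) L := by omega
        rw [heq]
        exact ih (cur + pyComb (L + 99) L) (fun x hx => hmem x (List.mem_cons_of_mem _ hx))

-- ===== VERDICT (by name: the statement is the Claim_ definition above) =====
theorem find_length_and_sum_py_spec : Claim_equal_find_length_and_sum_py := by
  intro rank _
  show find_length_and_sum_py rank = find_length_and_sum_py_alt rank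
  rw [find_length_and_sum_py, find_length_and_sum_py_alt]
  exact outer rank (PySem.List.pyRange 1 100 1) 0
    (fun L hL => ((PySem.List.mem_pyRange_one).mp hL).1)
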